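-- pv_equiv track=rewrite | github.com/0x1abin/micropython-esp32 | ports/m5stack/root/server_data/30aea449be0c/m5cloud.py | crc_1byte
-- ===== SOURCE A (Python) =====
-- def crc_1byte(data):
--   crc_1byte = 0
--   for i in range(0,8):
--     if((crc_1byte^data)&0x01):
--       crc_1byte ^= 0x18
--       crc_1byte >>= 1
--       crc_1byte |= 0x80
--     else:
--       crc_1byte >>= 1
--     data >>= 1
--   return crc_1byte
-- ===== SOURCE B (Python) =====
-- # Dallas/Maxim CRC-8 as a precomputed 256-entry lookup table: one index replaces A's 8-step bit loop.
-- CRC_TABLE = [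
--     0, 94, 188, 226, 97, 63, 221, 131, 194, 156, 126, 32, 163, 253, 31, 65,
--     157, 195, 33, 127, 252, 162, 64, 30, 95, 1, 227, 189, 62, 96, 130, 220,
--     35, 125, 159, 193, 66, 28, 254, 160, 225, 191, 93, 3, 128, 222, 60, 98,
--     190, 224, 2, 92, 223, 129, 99, 61, 124, 34, 192, 158, 29, 67, 161, 255,
--     70, 24, 250, 164, 39, 121, 155, 197, 132, 218, 56, 102, 229, 187, 89, 7,
--     219, 133, 103, 57, 186, 228, 6, 88, 25, 71, 165, 251, 120, 38, 196, 154,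
--     101, 59, 217, 135, 4, 90, 184, 230, 167, 249, 27, 69, 198, 152, 122, 36,
--     248, 166, 68, 26, 153, 199, 37, 123, 58, 100, 134, 216, 91, 5, 231, 185,
--     140, 210, 48, 110, 237, 179, 81, 15, 78, 16, 242, 172, 47, 113, 147, 205,
--     17, 79, 173, 243, 112, 46, 204, 146, 211, 141, 111, 49, 178, 236, 14, 80,
--     175, 241, 19, 77, 206, 144, 114, 44, 109, 51, 209, 143, 12, 82, 176, 238,
--     50, 108, 142, 208, 83, 13, 239, 177, 240, 174, 76, 18, 145, 207, 45, 115,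
--     202, 148, 118, 40, 171, 245, 23, 73, 8, 86, 180, 234, 105, 55, 213, 139,
--     87, 9, 235, 181, 54, 104, 138, 212, 149, 203, 41, 119, 244, 170, 72, 22,
--     233, 183, 85, 11, 136, 214, 52, 106, 43, 117, 151, 201, 74, 20, 246, 168,
--     116, 42, 200, 150, 21, 75, 169, 247, 182, 232, 10, 84, 215, 137, 107, 53,
-- ]
--
-- def crc_1byte(data):
--   return CRC_TABLE[data & 0xFF]
-- ===== Notes on version B (the rewrite author's own statement) =====
-- stated objective: alternative
-- what changed: Replaces the eight-iteration bit-serial CRC loop with a single index into a precomputed 256-entry lookup table at data & 0xFF (valid because the loop's result depends only on the low byte of data).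
import Mathlib
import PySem

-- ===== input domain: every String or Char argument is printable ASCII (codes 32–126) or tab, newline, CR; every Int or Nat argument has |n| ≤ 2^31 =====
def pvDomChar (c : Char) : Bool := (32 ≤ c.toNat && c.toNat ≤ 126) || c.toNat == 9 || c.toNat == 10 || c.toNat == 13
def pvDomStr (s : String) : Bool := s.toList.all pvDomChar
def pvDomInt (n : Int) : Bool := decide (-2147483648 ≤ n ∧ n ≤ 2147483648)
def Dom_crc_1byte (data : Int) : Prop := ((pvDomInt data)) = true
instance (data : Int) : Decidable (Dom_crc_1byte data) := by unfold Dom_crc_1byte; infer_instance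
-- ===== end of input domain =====

-- B replaces A's eight-step bit-serial CRC loop with a single index into a precomputed 256-entry lookup table (one lookup per call instead of eight shift/xor steps; both are constant-time).

-- ===== PORT A =====
-- loop body of A's 'for i in range(0,8)': crc/data state, Python's &, ^, |, >> via PySem / core shifts
def pvStepA (st : Int × Int) : Int × Int :=
  let crc := st.1
  let data := st.2
  if PySem.Int.band (PySem.Int.bxor crc data) 1 ≠ 0 then
    (PySem.Int.bor ((PySem.Int.bxor crc 0x18) >>> (1 : Nat)) 0x80, data >>> (1 : Nat))
  else
    (crc >>> (1 : Nat), data >>> (1 : Nat))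

def crc_1byte (data : Int) : Int :=
  ((PySem.List.pyRange 0 8 1).foldl (fun st _ => pvStepA st) (0, data)).1

-- ===== PORT B =====
def pvCrcTable : List Int := [
    0, 94, 188, 226, 97, 63, 221, 131, 194, 156, 126, 32, 163, 253, 31, 65,
    157, 195, 33, 127, 252, 162, 64, 30, 95, 1, 227, 189, 62, 96, 130, 220,
    35, 125, 159, 193, 66, 28, 254, 160, 225, 191, 93, 3, 128, 222, 60, 98,
    190, 224, 2, 92, 223, 129, 99, 61, 124, 34, 192, 158, 29, 67, 161, 255,
    70, 24, 250, 164, 39, 121, 155, 197, 132, 218, 56, 102, 229, 187, 89, 7,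
    219, 133, 103, 57, 186, 228, 6, 88, 25, 71, 165, 251, 120, 38, 196, 154,
    101, 59, 217, 135, 4, 90, 184, 230, 167, 249, 27, 69, 198, 152, 122, 36,
    248, 166, 68, 26, 153, 199, 37, 123, 58, 100, 134, 216, 91, 5, 231, 185,
    140, 210, 48, 110, 237, 179, 81, 15, 78, 16, 242, 172, 47, 113, 147, 205,
    17, 79, 173, 243, 112, 46, 204, 146, 211, 141, 111, 49, 178, 236, 14, 80,
    175, 241, 19, 77, 206, 144, 114, 44, 109, 51, 209, 143, 12, 82, 176, 238,
    50, 108, 142, 208, 83, 13, 239, 177, 240, 174, 76, 18, 145, 207, 45, 115,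
    202, 148, 118, 40, 171, 245, 23, 73, 8, 86, 180, 234, 105, 55, 213, 139,
    87, 9, 235, 181, 54, 104, 138, 212, 149, 203, 41, 119, 244, 170, 72, 22,
    233, 183, 85, 11, 136, 214, 52, 106, 43, 117, 151, 201, 74, 20, 246, 168,
    116, 42, 200, 150, 21, 75, 169, 247, 182, 232, 10, 84, 215, 137, 107, 53
]

def crc_1byte_alt (data : Int) : Int :=
  (PySem.List.pyGet? pvCrcTable (PySem.Int.band data 255)).getD 0
  -- index 'data & 0xFF' is always in range 0..255, so the Python never raises; getD 0 is unreachable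

-- ===== PRECONDITION & SPEC =====
def Spec_crc_1byte (data : Int) (out : Int) : Prop := out = crc_1byte_alt data
instance (data : Int) (out : Int) : Decidable (Spec_crc_1byte data out) := by unfold Spec_crc_1byte; infer_instance

-- ===== CLAIM (what is proved, stated in full; the proofs are below) =====
def Claim_equal_crc_1byte : Prop := ∀ (data : Int), Dom_crc_1byte data → Spec_crc_1byte data (crc_1byte data)

-- ===== LEMMAS AND PROOFS =====

theorem pv_nat_xor_parity (m n : Nat) : (m ^^^ n) % 2 = (m + n) % 2 := by
  have h := Nat.testBit_xor m n 0
  simp only [Nat.testBit_zero] at h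
  rcases Nat.mod_two_eq_zero_or_one m with hm | hm <;>
    rcases Nat.mod_two_eq_zero_or_one n with hn | hn <;>
      simp [hm, hn] at h ⊢

theorem pv_bxor_parity (a b : Int) : PySem.Int.bxor a b % 2 = (a + b) % 2 := by
  unfold PySem.Int.bxor
  split_ifs with ha hb hb
  · have h1 : ((a.toNat : Int)) = a := Int.toNat_of_nonneg ha
    have h2 : ((b.toNat : Int)) = b := Int.toNat_of_nonneg hb
    have h := pv_nat_xor_parity a.toNat b.toNat
    generalize hx : a.toNat ^^^ b.toNat = k at h ⊢
    omega
  · have h1 : ((a.toNat : Int)) = a := Int.toNat_of_nonneg ha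
    have h2 : (((-b - 1).toNat : Int)) = -b - 1 := Int.toNat_of_nonneg (by omega)
    have h := pv_nat_xor_parity a.toNat (-b - 1).toNat
    generalize hx : a.toNat ^^^ (-b - 1).toNat = k at h ⊢
    omega
  · have h1 : (((-a - 1).toNat : Int)) = -a - 1 := Int.toNat_of_nonneg (by omega)
    have h2 : ((b.toNat : Int)) = b := Int.toNat_of_nonneg hb
    have h := pv_nat_xor_parity (-a - 1).toNat b.toNat
    generalize hx : (-a - 1).toNat ^^^ b.toNat = k at h ⊢
    omega
  · have h1 : (((-a - 1).toNat : Int)) = -a - 1 := Int.toNat_of_nonneg (by omega)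
    have h2 : (((-b - 1).toNat : Int)) = -b - 1 := Int.toNat_of_nonneg (by omega)
    have h := pv_nat_xor_parity (-a - 1).toNat (-b - 1).toNat
    generalize hx : (-a - 1).toNat ^^^ (-b - 1).toNat = k at h ⊢
    omega

theorem pv_cond_eq (a b : Int) : PySem.Int.band (PySem.Int.bxor a b) 1 = (a + b) % 2 := by
  rw [PySem.Int.band_one, PySem.Int.mod_eq_emod_of_pos (by norm_num), pv_bxor_parity]

theorem pv_shift1 (d : Int) : d >>> (1 : Nat) = d / 2 := by
  simpa using Int.shiftRight_eq_div_pow d 1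

theorem pv_band255 (a : Int) : PySem.Int.band a 255 = a % 256 := by
  unfold PySem.Int.band
  by_cases ha : 0 ≤ a
  · rw [if_pos ha, if_pos (by norm_num : (0:Int) ≤ 255)]
    have h1 : ((a.toNat : Int)) = a := Int.toNat_of_nonneg ha
    have h : a.toNat &&& (255:Nat) = a.toNat % 256 := Nat.and_two_pow_sub_one_eq_mod a.toNat 8
    have h255 : (255:Int).toNat = 255 := rfl
    rw [h255, h]
    have hlt : a.toNat % 256 < 256 := Nat.mod_lt _ (by norm_num)
    omega
  · rw [if_neg ha, if_pos (by norm_num : (0:Int) ≤ 255)]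
    have h1 : (((-a - 1).toNat : Int)) = -a - 1 := Int.toNat_of_nonneg (by omega)
    have h : (255:Nat) &&& (-a - 1).toNat = (-a - 1).toNat % 256 := by
      have h0 := Nat.and_two_pow_sub_one_eq_mod (-a - 1).toNat 8
      rw [Nat.and_comm] at h0
      exact h0
    have h255 : (255:Int).toNat = 255 := rfl
    rw [h255, h]
    have hlt : (-a - 1).toNat % 256 < 256 := Nat.mod_lt _ (by norm_num)
    omega

theorem pv_half_mod (n : Nat) (d : Int) : (d / 2) % 2 ^ n = ((d % 2 ^ (n + 1)) / 2) % 2 ^ n := by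
  have hK : (0 : Int) < 2 ^ n := by positivity
  have h2 : ((2 : Int) ^ (n + 1)) = 2 * 2 ^ n := by ring
  have e : 2 ^ (n + 1) * (d / 2 ^ (n + 1)) + d % 2 ^ (n + 1) = d := Int.mul_ediv_add_emod d (2 ^ (n + 1))
  set r := d % 2 ^ (n + 1) with hr
  set q := d / 2 ^ (n + 1) with hq
  have hd : d = r + (2 ^ n * q) * 2 := by rw [h2] at e; ring_nf; ring_nf at e; omega
  have hdiv : d / 2 = r / 2 + 2 ^ n * q := by
    rw [hd]; exact Int.add_mul_ediv_right r (2 ^ n * q) (by norm_num)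
  rw [hdiv]
  exact Int.add_mul_emod_self_left (r / 2) (2 ^ n) q

theorem pv_iter_mod : ∀ (n : Nat) (crc d r : Int), d % 2 ^ n = r % 2 ^ n →
    (pvStepA^[n] (crc, d)).1 = (pvStepA^[n] (crc, r)).1 := by
  intro n
  induction n with
  | zero => intro crc d r _; rfl
  | succ n ih =>
    intro crc d r h
    have hpar : d % 2 = r % 2 := by
      have hd := Int.emod_emod_of_dvd d (show (2 : Int) ∣ 2 ^ (n + 1) from dvd_pow_self 2 (Nat.succ_ne_zero n))
      have hr := Int.emod_emod_of_dvd r (show (2 : Int) ∣ 2 ^ (n + 1) from dvd_pow_self 2 (Nat.succ_ne_zero n))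
      rw [← hd, ← hr, h]
    have hc : PySem.Int.band (PySem.Int.bxor crc d) 1 = PySem.Int.band (PySem.Int.bxor crc r) 1 := by
      rw [pv_cond_eq, pv_cond_eq]; omega
    have hhalf : (d >>> (1 : Nat)) % 2 ^ n = (r >>> (1 : Nat)) % 2 ^ n := by
      rw [pv_shift1, pv_shift1, pv_half_mod n d, pv_half_mod n r, h]
    simp only [Function.iterate_succ_apply]
    by_cases hb : PySem.Int.band (PySem.Int.bxor crc r) 1 ≠ 0
    · have hb' : PySem.Int.band (PySem.Int.bxor crc d) 1 ≠ 0 := by rw [hc]; exact hb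
      simp only [pvStepA, if_pos hb, if_pos hb']
      exact ih _ _ _ hhalf
    · have hb' : ¬ PySem.Int.band (PySem.Int.bxor crc d) 1 ≠ 0 := by rw [hc]; exact hb
      simp only [pvStepA, if_neg hb, if_neg hb']
      exact ih _ _ _ hhalf

theorem pv_foldl_iter (l : List Int) : ∀ (st : Int × Int),
    l.foldl (fun st _ => pvStepA st) st = pvStepA^[l.length] st := by
  induction l with
  | nil => intro st; rfl
  | cons x xs ih =>
    intro st
    simp only [List.foldl_cons, List.length_cons, Function.iterate_succ_apply]
    exact ih (pvStepA st)

theorem pv_crc_eq_iter (d : Int) : crc_1byte d = (pvStepA^[8] (0, d)).1 := by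
  unfold crc_1byte
  rw [pv_foldl_iter]
  rfl

theorem pv_crc_mod (d : Int) : crc_1byte d = crc_1byte (d % 256) := by
  rw [pv_crc_eq_iter, pv_crc_eq_iter]
  exact pv_iter_mod 8 0 d (d % 256) (by norm_num)

theorem pv_alt_mod (d : Int) : crc_1byte_alt d = crc_1byte_alt (d % 256) := by
  unfold crc_1byte_alt
  rw [pv_band255, pv_band255, Int.emod_emod_of_dvd d (dvd_refl (256 : Int))]

set_option maxRecDepth 100000 in
theorem pv_table_eq : ∀ k : Fin 256, crc_1byte ((k : Nat) : Int) = crc_1byte_alt ((k : Nat) : Int) := by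
  decide

-- ===== VERDICT (by name: the statement is the Claim_ definition above) =====
theorem crc_1byte_spec : Claim_equal_crc_1byte := by
  intro data _
  unfold Spec_crc_1byte
  rw [pv_crc_mod, pv_alt_mod]
  have h0 : 0 ≤ data % 256 := Int.emod_nonneg data (by norm_num)
  have h1 : data % 256 < 256 := Int.emod_lt_of_pos data (by norm_num)
  have hk := pv_table_eq ⟨(data % 256).toNat, by omega⟩
  simpa [Int.toNat_of_nonneg h0] using hk
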